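-- pv_equiv track=rewrite | github.com/Aditya-gam/Leetcode-Practice | CodeForces/EntranceExam/Variable_Naming.py | variable_naming
-- ===== SOURCE A (Python) =====
-- def variable_naming(var_names):
--
--
--
--     # Create a set to store used variable names
--     mapping = set()
--     # Create a list to store the output variable names
--     output = []
--
--     # Iterate through the given variable names
--     for var in var_names:
--         i = 1
--         # Keep incrementing i until a unique variable name is found
--         while var * i in mapping:
--             i += 1
--
--         # Add the unique variable name to the set and the output list
--         mapping.add(var * i)
--         output.append(var * i)
--
--     # Return the list of generated variable names
--     return output
-- ===== SOURCE B (Python) =====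
-- def variable_naming(var_names):
--     # One dict serves both as the set of used names and as a per-base resume
--     # pointer (LeetCode-1487 style): d[name] = next multiplier to try for base name.
--     d = {}
--     out = []
--     for var in var_names:
--         if var not in d:
--             out.append(var)
--             d[var] = 2
--         else:
--             i = d[var]
--             while var * i in d:
--                 i += 1
--             name = var * i
--             out.append(name)
--             d[var] = i + 1
--             d[name] = 2
--     return out
-- ===== Notes on version B (the rewrite author's own statement) =====
-- stated objective: faster
-- what changed: B drops A's separate set and per-call restart from i=1: one dict doubles as the used-name set and a per-base resume pointer (d[name] = next multiplier to try for base name, LeetCode-1487 style), with a no-search fast path for a base's first occurrence, so searches resume where the last one for that base stopped.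
import Mathlib
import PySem

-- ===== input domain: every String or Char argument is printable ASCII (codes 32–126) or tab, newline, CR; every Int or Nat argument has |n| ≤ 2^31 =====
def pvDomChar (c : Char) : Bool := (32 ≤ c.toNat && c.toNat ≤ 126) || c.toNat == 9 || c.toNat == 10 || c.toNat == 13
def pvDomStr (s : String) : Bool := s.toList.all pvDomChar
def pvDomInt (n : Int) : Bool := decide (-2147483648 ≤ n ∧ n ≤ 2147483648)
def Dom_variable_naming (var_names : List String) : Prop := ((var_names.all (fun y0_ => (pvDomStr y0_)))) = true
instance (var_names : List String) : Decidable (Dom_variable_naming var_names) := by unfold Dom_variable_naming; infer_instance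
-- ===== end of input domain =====

-- B replaces A's set-plus-restart search by a single dict that doubles as the used-name
-- set and a per-base resume pointer (objective: faster, asymptotic on duplicate-heavy
-- inputs); return values are identical on Pre_.

-- ===== PORT A =====
-- Python's  var * i  (string repetition)
def pyStrMul (v : String) (n : Nat) : String := String.ofList ((List.replicate n v.toList).flatten)

-- the while loop 'while var * i in mapping: i += 1' (fuel = |mapping|+1 always suffices
-- inside Pre_: distinct repeat counts give distinct strings for a nonempty base)
def vnFind (mapping : PySem.Set String) (var : String) (i : Nat) : Nat → Nat
  | 0 => i
  | fuel + 1 => if pyStrMul var i ∈ mapping then vnFind mapping var (i + 1) fuel else i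

def vnStepA (st : PySem.Set String × List String) (var : String) : PySem.Set String × List String :=
  let i := vnFind st.1 var 1 (st.1.length + 1)
  (PySem.Set.add st.1 (pyStrMul var i), st.2 ++ [pyStrMul var i])

def variable_naming (var_names : List String) : List String :=
  (var_names.foldl vnStepA (PySem.Set.empty, [])).2

-- ===== PORT B =====
-- Python's  var * i  as Source B builds it (repeated concatenation)
def bRep (v : String) : Nat → String
  | 0 => ""
  | n + 1 => v ++ bRep v n

-- the while loop 'while var * i in d: i += 1' (fuel = |d|+1 suffices inside Pre_)
def bProbe (d : PySem.Dict String Nat) (v : String) (fuel : Nat) (i : Nat) : Nat :=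
  match fuel with
  | 0 => i
  | f + 1 => if d.contains (bRep v i) then bProbe d v f (i + 1) else i

def bGo (d : PySem.Dict String Nat) : List String → List String
  | [] => []
  | var :: rest =>
    if d.contains var then
      let i := bProbe d var (d.size + 1) (d.getD var 1)
      let name := bRep var i
      name :: bGo ((d.insert var (i + 1)).insert name 2) rest
    else
      var :: bGo (d.insert var 2) rest

def variable_naming_alt (var_names : List String) : List String :=
  bGo PySem.Dict.empty var_names

-- ===== PRECONDITION & SPEC =====
-- A loops forever when the empty string occurs twice ("" * i == "" is then always used);
-- Pre_ excludes exactly those inputs (A returns on everything else).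
def Pre_variable_naming (var_names : List String) : Prop := var_names.count "" ≤ 1
instance (var_names : List String) : Decidable (Pre_variable_naming var_names) := by unfold Pre_variable_naming; infer_instance
def pvWitness_variable_naming : List String := ["a", "a", "b", ""]

def Spec_variable_naming (var_names : List String) (out : List String) : Prop := out = variable_naming_alt var_names
instance (var_names : List String) (out : List String) : Decidable (Spec_variable_naming var_names out) := by unfold Spec_variable_naming; infer_instance

-- ===== CLAIM (what is proved, stated in full; the proofs are below) =====
def Claim_equal_variable_naming : Prop := ∀ (var_names : List String), Dom_variable_naming var_names → Pre_variable_naming var_names → Spec_variable_naming var_names (variable_naming var_names)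

-- ===== LEMMAS AND PROOFS =====

theorem toList_pyStrMul (v : String) (n : Nat) :
    (pyStrMul v n).toList = (List.replicate n v.toList).flatten := by
  simp [pyStrMul]

theorem length_toList_pyStrMul (v : String) (n : Nat) :
    (pyStrMul v n).toList.length = n * v.toList.length := by
  simp [toList_pyStrMul, List.length_flatten, List.map_replicate, List.sum_replicate, smul_eq_mul]

theorem pyStrMul_one (v : String) : pyStrMul v 1 = v := by
  simp [pyStrMul]

theorem bRep_eq_pyStrMul (v : String) (n : Nat) : bRep v n = pyStrMul v n := by
  induction n with
  | zero => rfl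
  | succ n ih =>
    have h : (bRep v (n + 1)).toList = (pyStrMul v (n + 1)).toList := by
      simp [bRep, ih, toList_pyStrMul, List.replicate_succ]
    calc bRep v (n + 1) = String.ofList (bRep v (n + 1)).toList := by simp
      _ = String.ofList (pyStrMul v (n + 1)).toList := by rw [h]
      _ = pyStrMul v (n + 1) := by simp

theorem pyStrMul_ne_empty (v : String) (n : Nat) (hv : v ≠ "") (hn : 1 ≤ n) :
    pyStrMul v n ≠ "" := by
  intro h
  have h1 : (pyStrMul v n).toList.length = 0 := by rw [h]; rfl
  have h2 : v.toList ≠ [] := fun hnil => hv (by simpa using congrArg String.ofList hnil)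
  have h3 : 0 < v.toList.length := List.length_pos_iff.mpr h2
  rw [length_toList_pyStrMul] at h1
  have := Nat.mul_pos (show 0 < n by omega) h3
  omega

theorem pyStrMul_inj (v : String) (hv : v ≠ "") {m n : Nat} (h : pyStrMul v m = pyStrMul v n) :
    m = n := by
  have h2 : v.toList ≠ [] := fun hnil => hv (by simpa using congrArg String.ofList hnil)
  have h3 : 0 < v.toList.length := List.length_pos_iff.mpr h2
  have hl : (pyStrMul v m).toList.length = (pyStrMul v n).toList.length := by rw [h]
  rw [length_toList_pyStrMul, length_toList_pyStrMul] at hl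
  exact Nat.eq_of_mul_eq_mul_right h3 hl

-- characterization of A's while loop: it returns the least free index ≥ i, given enough fuel
theorem vnFind_eq (s : PySem.Set String) (var : String) (r : Nat) :
    ∀ (fuel i : Nat), i ≤ r → pyStrMul var r ∉ s →
    (∀ j, i ≤ j → j < r → pyStrMul var j ∈ s) → r < i + fuel →
    vnFind s var i fuel = r := by
  intro fuel
  induction fuel with
  | zero => intro i h1 _ _ h4; omega
  | succ fuel ih =>
    intro i h1 h2 h3 h4
    by_cases hmem : pyStrMul var i ∈ s
    · have hir : i < r := by
        rcases Nat.lt_or_ge i r with h | h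
        · exact h
        · have : i = r := by omega
          exact absurd (this ▸ hmem) h2
      simp only [vnFind, if_pos hmem]
      exact ih (i + 1) (by omega) h2 (fun j hj1 hj2 => h3 j (by omega) hj2) (by omega)
    · have : i = r := by
        rcases Nat.lt_or_ge i r with h | h
        · exact absurd (h3 i (le_refl i) h) hmem
        · omega
      simp only [vnFind, if_neg hmem]
      exact this

-- the same characterization for B's while loop, phrased through the membership
-- correspondence between the dict's keys and A's set
theorem bProbe_eq (d : PySem.Dict String Nat) (s : PySem.Set String)
    (hmem : ∀ x, x ∈ s ↔ d.contains x = true) (var : String) (r : Nat) :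
    ∀ (fuel i : Nat), i ≤ r → pyStrMul var r ∉ s →
    (∀ j, i ≤ j → j < r → pyStrMul var j ∈ s) → r < i + fuel →
    bProbe d var fuel i = r := by
  intro fuel
  induction fuel with
  | zero => intro i h1 _ _ h4; omega
  | succ fuel ih =>
    intro i h1 h2 h3 h4
    by_cases hm : pyStrMul var i ∈ s
    · have hir : i < r := by
        rcases Nat.lt_or_ge i r with h | h
        · exact h
        · have : i = r := by omega
          exact absurd (this ▸ hm) h2
      have hc : d.contains (bRep var i) = true := by
        rw [bRep_eq_pyStrMul]; exact (hmem _).mp hm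
      simp only [bProbe, hc, if_true]
      exact ih (i + 1) (by omega) h2 (fun j hj1 hj2 => h3 j (by omega) hj2) (by omega)
    · have hc : d.contains (bRep var i) = false := by
        rw [bRep_eq_pyStrMul]
        cases hcc : d.contains (pyStrMul var i)
        · rfl
        · exact absurd ((hmem _).mpr hcc) hm
      have : i = r := by
        rcases Nat.lt_or_ge i r with h | h
        · exact absurd (h3 i (le_refl i) h) hm
        · omega
      simp only [bProbe, hc]
      exact this

-- pigeonhole: for a nonempty base, some repeat count in [1, |s|+1] is free
theorem exists_free (s : PySem.Set String) (hn : s.Nodup) (var : String) (hv : var ≠ "") :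
    ∃ n, 1 ≤ n ∧ n ≤ s.length + 1 ∧ pyStrMul var n ∉ s := by
  by_contra hall
  push Not at hall
  have hsub : (Finset.Icc 1 (s.length + 1)).image (pyStrMul var) ⊆ s.toFinset := by
    intro x hx
    rcases Finset.mem_image.mp hx with ⟨n, hn', rfl⟩
    rcases Finset.mem_Icc.mp hn' with ⟨hn1, hn2⟩
    exact List.mem_toFinset.mpr (hall n hn1 hn2)
  have hcard : ((Finset.Icc 1 (s.length + 1)).image (pyStrMul var)).card = s.length + 1 := by
    rw [Finset.card_image_of_injOn (fun a _ b _ h => pyStrMul_inj var hv h)]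
    simp
  have h1 := Finset.card_le_card hsub
  rw [hcard, List.toFinset_card_of_nodup hn] at h1
  omega

-- the loop invariant tying A's (set, output) state to B's dict state
theorem loop_eq (l : List String) :
    ∀ (s : PySem.Set String) (d : PySem.Dict String Nat) (out : List String),
    s.Nodup →
    (∀ x, x ∈ s ↔ d.contains x = true) →
    (∀ v c, d.get? v = some c → 2 ≤ c ∧ ∀ j, 1 ≤ j → j < c → pyStrMul v j ∈ s) →
    d.size = s.length →
    ("" ∈ s → "" ∉ l) → l.count "" ≤ 1 →
    (l.foldl vnStepA (s, out)).2 = out ++ bGo d l := by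
  induction l with
  | nil => intro s d out _ _ _ _ _ _; simp [bGo]
  | cons var l ih =>
    intro s d out hnd hmem hcache hsize hemp hcnt
    cases hcon : d.contains var with
    | false =>
      -- first occurrence of this base: A's search returns 1 at once, B takes the fast path
      have hvnot : var ∉ s := by
        intro h
        have := (hmem var).mp h
        rw [hcon] at this
        cases this
      have hfree1 : pyStrMul var 1 ∉ s := by rw [pyStrMul_one]; exact hvnot
      have hA : vnFind s var 1 (s.length + 1) = 1 :=
        vnFind_eq s var 1 (s.length + 1) 1 le_rfl hfree1 (by omega) (by omega)
      have hstepA : ((var :: l).foldl vnStepA (s, out)).2 =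
          (l.foldl vnStepA (PySem.Set.add s var, out ++ [var])).2 := by
        simp only [List.foldl_cons, vnStepA, hA, pyStrMul_one]
      have hstepB : bGo d (var :: l) = var :: bGo (d.insert var 2) l := by
        simp only [bGo, hcon, Bool.false_eq_true, if_false]
      rw [hstepA, hstepB]
      rw [ih (PySem.Set.add s var) (d.insert var 2) (out ++ [var])
        (PySem.Set.nodup_add s var hnd)
        (by
          intro x
          rw [PySem.Set.mem_add, PySem.Dict.contains_insert, Bool.or_eq_true, beq_iff_eq,
            ← hmem x]
          tauto)
        (by
          intro v c hg
          by_cases hv : v = var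
          · subst hv
            rw [PySem.Dict.get?_insert_self] at hg
            cases hg
            refine ⟨le_rfl, ?_⟩
            intro j hj1 hj2
            have : j = 1 := by omega
            subst this
            rw [pyStrMul_one]
            exact (PySem.Set.mem_add s v v).mpr (Or.inr rfl)
          · rw [PySem.Dict.get?_insert_of_ne d 2 hv] at hg
            obtain ⟨hc2, hcb⟩ := hcache v c hg
            exact ⟨hc2, fun j hj1 hj2 =>
              (PySem.Set.mem_add s var _).mpr (Or.inl (hcb j hj1 hj2))⟩)
        (by
          rw [PySem.Dict.size_insert, hcon, PySem.Set.add_of_not_mem hvnot]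
          simp [hsize])
        (by
          intro hin hl
          rcases (PySem.Set.mem_add s var "").mp hin with h | h
          · exact (hemp h) (List.mem_cons_of_mem var hl)
          · subst h
            have h0 : l.count "" = 0 := by simp at hcnt; omega
            exact (List.count_eq_zero.mp h0) hl)
        (by
          by_cases hv : var = ""
          · subst hv; simp at hcnt; omega
          · simp [List.count_cons] at hcnt
            split_ifs at hcnt
            omega)]
      simp
    | true =>
      -- repeat occurrence: A restarts from 1, B resumes from the cached multiplier;
      -- both land on the least free repeat count r
      have hvin : var ∈ s := (hmem var).mpr hcon
      have hvne : var ≠ "" := by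
        intro h
        subst h
        exact hemp hvin List.mem_cons_self
      obtain ⟨c, hg⟩ : ∃ c, d.get? var = some c := by
        rw [PySem.Dict.contains_eq_isSome_get?] at hcon
        exact Option.isSome_iff_exists.mp hcon
      obtain ⟨hc2, hbelowc⟩ := hcache var c hg
      obtain ⟨n, hn1, hn2, hn3⟩ := exists_free s hnd var hvne
      have hexQ : ∃ k, pyStrMul var (k + 1) ∉ s := ⟨n - 1, by
        have heq : n - 1 + 1 = n := by omega
        rw [heq]; exact hn3⟩
      set r := Nat.find hexQ + 1 with hr
      have hfree : pyStrMul var r ∉ s := Nat.find_spec hexQ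
      have hbelow : ∀ j, 1 ≤ j → j < r → pyStrMul var j ∈ s := by
        intro j hj1 hj2
        have hmin := Nat.find_min hexQ (m := j - 1) (by omega)
        have hj : j - 1 + 1 = j := by omega
        rw [hj] at hmin
        exact not_not.mp hmin
      have hrle : r ≤ s.length + 1 := by
        have := Nat.find_min' hexQ (m := n - 1) (by
          have heq : n - 1 + 1 = n := by omega
          rw [heq]; exact hn3)
        omega
      have hcr : c ≤ r := by
        by_contra hlt
        push Not at hlt
        exact hfree (hbelowc r (by omega) hlt)
      have hr2 : 2 ≤ r := by omega
      have hA : vnFind s var 1 (s.length + 1) = r :=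
        vnFind_eq s var r (s.length + 1) 1 (by omega) hfree hbelow (by omega)
      have hB : bProbe d var (d.size + 1) c = r :=
        bProbe_eq d s hmem var r (d.size + 1) c hcr hfree
          (fun j hj1 hj2 => hbelow j (by omega) hj2) (by rw [hsize]; omega)
      have hgd : d.getD var 1 = c := PySem.Dict.getD_of_get?_eq_some d 1 hg
      have hnv : pyStrMul var r ≠ var := by
        intro h
        have := pyStrMul_inj var hvne (h.trans (pyStrMul_one var).symm)
        omega
      have hstepA : ((var :: l).foldl vnStepA (s, out)).2 =
          (l.foldl vnStepA (PySem.Set.add s (pyStrMul var r),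
            out ++ [pyStrMul var r])).2 := by
        simp only [List.foldl_cons, vnStepA, hA]
      have hstepB : bGo d (var :: l) = pyStrMul var r ::
          bGo ((d.insert var (r + 1)).insert (pyStrMul var r) 2) l := by
        simp only [bGo, hcon, if_true, hgd, hB, bRep_eq_pyStrMul]
      rw [hstepA, hstepB]
      rw [ih (PySem.Set.add s (pyStrMul var r))
        ((d.insert var (r + 1)).insert (pyStrMul var r) 2)
        (out ++ [pyStrMul var r])
        (PySem.Set.nodup_add s _ hnd)
        (by
          intro x
          rw [PySem.Set.mem_add, PySem.Dict.contains_insert, PySem.Dict.contains_insert,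
            Bool.or_eq_true, Bool.or_eq_true, beq_iff_eq, beq_iff_eq, ← hmem x]
          constructor
          · rintro (h | h)
            · exact Or.inr (Or.inr h)
            · exact Or.inl h
          · rintro (h | h | h)
            · exact Or.inr h
            · exact Or.inl (h ▸ hvin)
            · exact Or.inl h)
        (by
          intro v c' hg'
          by_cases hv : v = pyStrMul var r
          · subst hv
            rw [PySem.Dict.get?_insert_self] at hg'
            cases hg'
            refine ⟨le_rfl, ?_⟩
            intro j hj1 hj2
            have : j = 1 := by omega
            subst this
            rw [pyStrMul_one]
            exact (PySem.Set.mem_add s _ _).mpr (Or.inr rfl)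
          · rw [PySem.Dict.get?_insert_of_ne _ 2 hv] at hg'
            by_cases hv2 : v = var
            · subst hv2
              rw [PySem.Dict.get?_insert_self] at hg'
              cases hg'
              refine ⟨by omega, ?_⟩
              intro j hj1 hj2
              rcases Nat.lt_or_ge j r with h | h
              · exact (PySem.Set.mem_add s _ _).mpr (Or.inl (hbelow j hj1 h))
              · have : j = r := by omega
                subst this
                exact (PySem.Set.mem_add s _ _).mpr (Or.inr rfl)
            · rw [PySem.Dict.get?_insert_of_ne _ (r+1) hv2] at hg'
              obtain ⟨hc2', hcb'⟩ := hcache v c' hg'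
              exact ⟨hc2', fun j hj1 hj2 =>
                (PySem.Set.mem_add s _ _).mpr (Or.inl (hcb' j hj1 hj2))⟩)
        (by
          have hnc : (d.insert var (r + 1)).contains (pyStrMul var r) = false := by
            rw [PySem.Dict.contains_insert]
            have h2 : d.contains (pyStrMul var r) = false := by
              cases hcc : d.contains (pyStrMul var r)
              · rfl
              · exact absurd ((hmem _).mpr hcc) hfree
            simp [hnv, h2]
          rw [PySem.Dict.size_insert, hnc, PySem.Dict.size_insert, hcon,
            PySem.Set.add_of_not_mem hfree]
          simp [hsize])
        (by
          intro hin hl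
          rcases (PySem.Set.mem_add s _ "").mp hin with h | h
          · exact (hemp h) (List.mem_cons_of_mem var hl)
          · exact pyStrMul_ne_empty var r hvne (by omega) h.symm)
        (by
          simp [List.count_cons] at hcnt ⊢
          split_ifs at hcnt
          · omega
          · exact hcnt)]
      simp

-- ===== VERDICT (by name: the statement is the Claim_ definition above) =====
theorem variable_naming_spec : Claim_equal_variable_naming := by
  intro var_names _ hpre
  unfold Spec_variable_naming variable_naming variable_naming_alt
  exact loop_eq var_names PySem.Set.empty PySem.Dict.empty []
    List.nodup_nil (by intro x; simp [PySem.Dict.contains_empty])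
    (by intro v c hg; rw [PySem.Dict.get?_empty] at hg; cases hg)
    (by rfl) (by intro h; cases h) hpre
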